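-- pv_equiv track=rewrite | github.com/MarryAngel/TCC-IC | src/qsupervised.py | _edge_vertex
-- ===== SOURCE A (Python) =====
-- def _edge_vertex(pos, n_nodes):
--     posAtual = 0
--     for i in range(1, n_nodes+1):
--         for j in range(i+1, n_nodes+1):
--             if pos==posAtual:
--                 return (i-1,j-1)
--             posAtual +=1
--     return None
-- ===== SOURCE B (Python) =====
-- def _edge_vertex(pos, n_nodes):
--     if pos < 0:
--         return None
--     rem = pos
--     for a in range(n_nodes - 1):
--         row = n_nodes - 1 - a
--         if rem < row:
--             return (a, a + 1 + rem)
--         rem -= row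
--     return None
-- ===== Notes on version B (the rewrite author's own statement) =====
-- stated objective: faster
-- what changed: Replaced the nested enumeration of all vertex pairs with a counter by a single loop over rows that subtracts each row's size from the index and computes the second vertex arithmetically.
import Mathlib
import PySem

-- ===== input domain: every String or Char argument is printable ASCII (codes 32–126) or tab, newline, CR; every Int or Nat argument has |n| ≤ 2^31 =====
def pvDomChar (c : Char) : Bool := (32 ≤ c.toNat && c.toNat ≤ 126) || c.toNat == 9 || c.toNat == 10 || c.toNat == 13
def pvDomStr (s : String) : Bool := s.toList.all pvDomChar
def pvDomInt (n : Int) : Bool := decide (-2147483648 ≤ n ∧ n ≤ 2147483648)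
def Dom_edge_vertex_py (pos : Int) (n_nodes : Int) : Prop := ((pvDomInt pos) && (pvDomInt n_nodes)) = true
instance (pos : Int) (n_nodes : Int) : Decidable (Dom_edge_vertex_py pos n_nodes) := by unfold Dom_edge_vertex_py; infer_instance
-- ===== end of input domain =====

-- B replaces A's nested enumeration of all pairs with a single loop over rows
-- that subtracts each row's size from the index (objective: faster).

-- ===== PORT A =====
-- inner 'for j in range(i+1, n+1)' loop (range iterated lazily, as in Python):
-- Sum.inl = early return, Sum.inr = fell through with updated posAtual
def evA_inner (pos i n : Int) (posAtual j : Int) : Sum (List Int) Int :=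
  if _h : j < n + 1 then
    if pos = posAtual then Sum.inl [i - 1, j - 1]
    else evA_inner pos i n (posAtual + 1) (j + 1)
  else Sum.inr posAtual
termination_by (n + 1 - j).toNat
decreasing_by omega

-- outer 'for i in range(1, n+1)' loop
def evA_go (pos n : Int) (i posAtual : Int) : Option (List Int) :=
  if _h : i < n + 1 then
    match evA_inner pos i n posAtual (i + 1) with
    | Sum.inl r => some r
    | Sum.inr posAtual' => evA_go pos n (i + 1) posAtual'
  else none
termination_by (n + 1 - i).toNat
decreasing_by omega

def edge_vertex_py (pos : Int) (n_nodes : Int) : Option (List Int) :=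
  evA_go pos n_nodes 1 0

-- ===== PORT B =====
-- 'for a in range(n_nodes - 1)' loop of Source B: one row at a time, subtracting the row size
def evB_go (n : Int) (rem a : Int) : Option (List Int) :=
  if _h : a < n - 1 then
    let row := n - 1 - a
    if rem < row then some [a, a + 1 + rem]
    else evB_go n (rem - row) (a + 1)
  else none
termination_by (n - 1 - a).toNat
decreasing_by omega

def edge_vertex_py_alt (pos : Int) (n_nodes : Int) : Option (List Int) :=
  if pos < 0 then none
  else evB_go n_nodes pos 0

-- ===== PRECONDITION & SPEC =====
def Spec_edge_vertex_py (pos : Int) (n_nodes : Int) (out : Option (List Int)) : Prop := out = edge_vertex_py_alt pos n_nodes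
instance (pos : Int) (n_nodes : Int) (out : Option (List Int)) : Decidable (Spec_edge_vertex_py pos n_nodes out) := by unfold Spec_edge_vertex_py; infer_instance

-- ===== CLAIM (what is proved, stated in full; the proofs are below) =====
def Claim_equal_edge_vertex_py : Prop := ∀ (pos : Int) (n_nodes : Int), Dom_edge_vertex_py pos n_nodes → Spec_edge_vertex_py pos n_nodes (edge_vertex_py pos n_nodes)

-- ===== LEMMAS AND PROOFS =====

-- Characterisation of the inner loop from j with counter posAtual = c.
theorem evA_inner_spec (pos i n : Int) :
    ∀ (k : Nat) (j c : Int), j ≤ n + 1 → (n + 1 - j).toNat = k →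
    evA_inner pos i n c j =
      if c ≤ pos ∧ pos < c + (n + 1 - j) then Sum.inl [i - 1, pos - c + j - 1]
      else Sum.inr (c + (n + 1 - j)) := by
  intro k
  induction k with
  | zero =>
    intro j c hj hk
    rw [evA_inner, dif_neg (by omega), if_neg (by omega)]
    exact congrArg Sum.inr (by omega)
  | succ k ih =>
    intro j c hj hk
    rw [evA_inner, dif_pos (by omega)]
    by_cases hpc : pos = c
    · rw [if_pos hpc, if_pos (by omega)]
      exact congrArg Sum.inl (by rw [show pos - c + j - 1 = j - 1 by omega])
    · rw [if_neg hpc, ih (j + 1) (c + 1) (by omega) (by omega)]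
      by_cases hcond : c ≤ pos ∧ pos < c + (n + 1 - j)
      · rw [if_pos (by omega), if_pos hcond]
        exact congrArg Sum.inl (by rw [show pos - (c + 1) + (j + 1) - 1 = pos - c + j - 1 by omega])
      · rw [if_neg (by omega), if_neg hcond]
        exact congrArg Sum.inr (by omega)

-- When pos is below the counter (in particular negative) A never matches and returns none.
theorem evA_go_neg (pos n : Int) :
    ∀ (k : Nat) (i c : Int), (n + 1 - i).toNat = k → pos < c →
    evA_go pos n i c = none := by
  intro k
  induction k with
  | zero =>
    intro i c hk _
    rw [evA_go, dif_neg (by omega)]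
  | succ k ih =>
    intro i c hk hpc
    rw [evA_go, dif_pos (by omega),
      evA_inner_spec pos i n (n + 1 - (i + 1)).toNat (i + 1) c (by omega) rfl,
      if_neg (by omega)]
    exact ih (i + 1) _ (by omega) (by omega)

-- Main correspondence: A's remaining outer loop from row i with counter c equals
-- B's remaining loop from row index i-1 with rem = pos - c.
theorem evA_go_eq_evB_go (pos n : Int) :
    ∀ (k : Nat) (i c : Int), (n + 1 - i).toNat = k → 0 ≤ pos - c →
    evA_go pos n i c = evB_go n (pos - c) (i - 1) := by
  intro k
  induction k with
  | zero =>
    intro i c hk _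
    rw [evA_go, dif_neg (by omega), evB_go, dif_neg (by omega)]
  | succ k ih =>
    intro i c hk hrem
    by_cases hin : i < n
    · rw [evA_go, dif_pos (by omega),
        evA_inner_spec pos i n (n + 1 - (i + 1)).toNat (i + 1) c (by omega) rfl,
        evB_go, dif_pos (by omega)]
      by_cases hcond : c ≤ pos ∧ pos < c + (n + 1 - (i + 1))
      · rw [if_pos hcond]
        show some _ = if pos - c < n - 1 - (i - 1) then some [i - 1, i - 1 + 1 + (pos - c)]
          else evB_go n (pos - c - (n - 1 - (i - 1))) (i - 1 + 1)
        rw [if_pos (by omega)]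
        exact congrArg some (by
          rw [show pos - c + (i + 1) - 1 = i - 1 + 1 + (pos - c) by omega])
      · rw [if_neg hcond]
        show evA_go pos n (i + 1) (c + (n + 1 - (i + 1))) =
          if pos - c < n - 1 - (i - 1) then some [i - 1, i - 1 + 1 + (pos - c)]
          else evB_go n (pos - c - (n - 1 - (i - 1))) (i - 1 + 1)
        rw [if_neg (by omega), ih (i + 1) (c + (n + 1 - (i + 1))) (by omega) (by omega)]
        rw [show i + 1 - 1 = i - 1 + 1 by omega,
          show pos - (c + (n + 1 - (i + 1))) = pos - c - (n - 1 - (i - 1)) by omega]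
    · by_cases hi : i = n
      · rw [evA_go, dif_pos (by omega),
          evA_inner_spec pos i n 0 (i + 1) c (by omega) (by omega), if_neg (by omega)]
        show evA_go pos n (i + 1) _ = _
        rw [evA_go, dif_neg (by omega), evB_go, dif_neg (by omega)]
      · rw [evA_go, dif_neg (by omega), evB_go, dif_neg (by omega)]

-- ===== VERDICT (by name: the statement is the Claim_ definition above) =====
theorem edge_vertex_py_spec : Claim_equal_edge_vertex_py := by
  intro pos n _
  unfold Spec_edge_vertex_py edge_vertex_py edge_vertex_py_alt
  by_cases hneg : pos < 0
  · rw [if_pos hneg]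
    exact evA_go_neg pos n n.toNat 1 0 (by omega) hneg
  · rw [if_neg hneg]
    have := evA_go_eq_evB_go pos n n.toNat 1 0 (by omega) (by omega)
    simpa using this
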